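-- pv_equiv track=rewrite | github.com/inon-peled/advent_of_code | y2024/cal25_part1.py | solve
-- ===== SOURCE A (Python) =====
-- def _simulate_one_diagonal(diag_num, last_code):
--     diag = []
--     for i in range(diag_num):
--         last_code = (last_code * 252533) % 33554393
--         diag.append(last_code)
--     return diag
--
-- def solve(first_code, final_row, final_col):
--     if final_row == final_col == 1:
--         return first_code
--
--     last_code = first_code
--     final_diag = final_row + final_col - 1
--
--     for i in range(2, final_diag + 1):
--         diag = _simulate_one_diagonal(i, last_code)
--         last_code = diag[-1]
--
--     solution = diag[final_col - 1]
--     return solution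
-- ===== SOURCE B (Python) =====
-- def solve(first_code, final_row, final_col):
--     if final_row == final_col == 1:
--         return first_code
--     d = final_row + final_col - 1
--     n = d * (d - 1) // 2 + final_col - 1
--     return first_code * pow(252533, n, 33554393) % 33554393
-- ===== Notes on version B (the rewrite author's own statement) =====
-- stated objective: faster
-- what changed: Replaces the O(d^2) diagonal-by-diagonal simulation with a closed-form step count n = d(d-1)/2 + col - 1 followed by fast modular exponentiation (pow with modulus).
-- outside the precondition, e.g. on solve(20151125, 3, 0): A returns 18749137, B returns 20151125; on solve(20151125, 0, 1): A raises UnboundLocalError, B returns 20151125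
import Mathlib
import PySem

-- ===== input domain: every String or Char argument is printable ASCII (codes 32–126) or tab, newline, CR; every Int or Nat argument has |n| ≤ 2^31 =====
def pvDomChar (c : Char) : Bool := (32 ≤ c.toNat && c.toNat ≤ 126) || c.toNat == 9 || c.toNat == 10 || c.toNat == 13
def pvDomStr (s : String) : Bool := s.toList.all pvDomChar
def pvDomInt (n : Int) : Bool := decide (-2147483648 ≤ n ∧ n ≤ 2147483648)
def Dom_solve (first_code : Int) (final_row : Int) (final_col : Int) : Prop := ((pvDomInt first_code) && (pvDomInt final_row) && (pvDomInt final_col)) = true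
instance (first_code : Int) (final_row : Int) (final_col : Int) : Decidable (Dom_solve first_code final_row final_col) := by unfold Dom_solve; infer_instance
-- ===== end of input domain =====

-- B replaces A's O(d^2) diagonal-by-diagonal simulation with the closed-form step
-- count n = d(d-1)/2 + col - 1 and fast modular exponentiation (objective: faster).

-- ===== PORT A =====
-- port of _simulate_one_diagonal: builds the diagonal list by repeated modular multiplication
def pvSimOneDiag (diag_num : Int) (last_code : Int) : List Int :=
  ((PySem.List.pyRange 0 diag_num 1).foldl
    (fun (st : List Int × Int) _ =>
      let lc := PySem.Int.mod (st.2 * 252533) 33554393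
      (st.1 ++ [lc], lc))
    (([] : List Int), last_code)).1

def solve (first_code : Int) (final_row : Int) (final_col : Int) : Int :=
  if final_row = final_col ∧ final_col = 1 then first_code
  else
    let final_diag := final_row + final_col - 1
    -- the loop carries (diag, last_code); diag[-1] via pyGetD (raises only outside Pre_)
    let st := (PySem.List.pyRange 2 (final_diag + 1) 1).foldl
      (fun (st : List Int × Int) i =>
        let diag := pvSimOneDiag i st.2
        (diag, PySem.List.pyGetD diag (-1) 0))
      (([] : List Int), first_code)
    PySem.List.pyGetD st.1 (final_col - 1) 0

-- ===== PORT B =====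
-- port of Python's pow(b, n, m): square-and-multiply modular exponentiation
def pvPowMod (b : Int) (n : Nat) (m : Int) : Int :=
  if h : n = 0 then PySem.Int.mod 1 m
  else
    let half := pvPowMod (PySem.Int.mod (b * b) m) (n / 2) m
    if n % 2 = 1 then PySem.Int.mod (half * b) m else half
termination_by n
decreasing_by exact Nat.div_lt_self (Nat.pos_of_ne_zero h) (by norm_num)

-- Python's three-argument pow for a possibly negative exponent: pow(b, -k, m) is the
-- modular inverse raised to k; Source B only calls it with the prime modulus 33554393, for
-- which the inverse is b^(m-2) mod m (exact for this call; Pre_ only needs n ≥ 0)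
def pvPow (b : Int) (n : Int) (m : Int) : Int :=
  if n < 0 then pvPowMod (pvPowMod b (m - 2).toNat m) (-n).toNat m
  else pvPowMod b n.toNat m

def solve_alt (first_code : Int) (final_row : Int) (final_col : Int) : Int :=
  if final_row = final_col ∧ final_col = 1 then first_code
  else
    let d := final_row + final_col - 1
    let n := PySem.Int.floordiv (d * (d - 1)) 2 + final_col - 1
    PySem.Int.mod (first_code * pvPow 252533 n 33554393) 33554393

-- ===== PRECONDITION & SPEC =====
-- Pre_ restricts to the puzzle's natural grid (row ≥ 1, col ≥ 1): outside it A either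
-- raises (UnboundLocalError/IndexError) or returns an accidental value via Python's
-- negative-index wraparound on diag[final_col - 1].
def Pre_solve (first_code : Int) (final_row : Int) (final_col : Int) : Prop :=
  1 ≤ final_row ∧ 1 ≤ final_col

instance (first_code : Int) (final_row : Int) (final_col : Int) : Decidable (Pre_solve first_code final_row final_col) := by unfold Pre_solve; infer_instance

def pvWitness_solve : Int × Int × Int := (20151125, 3, 4)

def Spec_solve (first_code : Int) (final_row : Int) (final_col : Int) (out : Int) : Prop := out = solve_alt first_code final_row final_col
instance (first_code : Int) (final_row : Int) (final_col : Int) (out : Int) : Decidable (Spec_solve first_code final_row final_col out) := by unfold Spec_solve; infer_instance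

-- ===== CLAIM (what is proved, stated in full; the proofs are below) =====
def Claim_equal_solve : Prop := ∀ (first_code : Int) (final_row : Int) (final_col : Int), Dom_solve first_code final_row final_col → Pre_solve first_code final_row final_col → Spec_solve first_code final_row final_col (solve first_code final_row final_col)

-- ===== LEMMAS AND PROOFS =====

-- the code in row/col position with k multiplication steps from the initial code a
def pvF (a : Int) (k : Nat) : Int := (a * 252533 ^ k) % 33554393

-- pvS i = 1 + 2 + … + i
def pvS : Nat → Nat
  | 0 => 0
  | i + 1 => pvS i + (i + 1)

lemma pvS_eq (i : Nat) : 2 * pvS i = i * (i + 1) := by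
  induction i with
  | zero => rfl
  | succ i ih =>
    calc 2 * pvS (i + 1) = 2 * pvS i + 2 * (i + 1) := by simp [pvS]; ring
      _ = i * (i + 1) + 2 * (i + 1) := by rw [ih]
      _ = (i + 1) * (i + 1 + 1) := by ring

lemma pv_mulmod (u c : Int) : (u % 33554393 * c) % 33554393 = u * c % 33554393 := by
  conv_rhs => rw [Int.mul_emod]
  rw [Int.mul_emod, Int.emod_emod_of_dvd _ dvd_rfl]

lemma pvPowMod_correct (n : Nat) : ∀ (b : Int), pvPowMod b n 33554393 = b ^ n % 33554393 := by
  induction n using Nat.strong_induction_on with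
  | _ n ih =>
    intro b
    rw [pvPowMod]
    by_cases h : n = 0
    · simp [h]
    · simp only [h, dite_false, PySem.Int.mod_eq_emod_of_pos (by norm_num : (0:Int) < 33554393)]
      have hrec := ih (n / 2) (Nat.div_lt_self (Nat.pos_of_ne_zero h) (by norm_num)) (b * b % 33554393)
      have hpow : (b * b % 33554393) ^ (n / 2) % 33554393 = b ^ (2 * (n / 2)) % 33554393 := by
        have h1 : (b * b % 33554393) ^ (n / 2) % 33554393 = (b * b) ^ (n / 2) % 33554393 :=
          (Int.ModEq.pow (n / 2) (Int.emod_emod_of_dvd _ dvd_rfl))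
        rw [h1, ← pow_two, ← pow_mul]
      by_cases hpar : n % 2 = 1
      · simp only [hpar, if_true, hrec, hpow, pv_mulmod, ← pow_succ]
        have : 2 * (n / 2) + 1 = n := by omega
        rw [this]
      · simp only [hpar, if_false, hrec, hpow]
        have : 2 * (n / 2) = n := by omega
        rw [this]

lemma pv_step (a : Int) (s : Int) (k : Nat)
    (h : s % 33554393 = a * 252533 ^ k % 33554393) :
    PySem.Int.mod (s * 252533) 33554393 = pvF a (k + 1) := by
  rw [PySem.Int.mod_eq_emod_of_pos (by norm_num : (0:Int) < 33554393)]
  unfold pvF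
  calc s * 252533 % 33554393 = s % 33554393 * 252533 % 33554393 := (pv_mulmod s 252533).symm
    _ = a * 252533 ^ k % 33554393 * 252533 % 33554393 := by rw [h]
    _ = a * 252533 ^ k * 252533 % 33554393 := pv_mulmod _ _
    _ = a * 252533 ^ (k + 1) % 33554393 := by ring_nf

lemma pv_step' (a : Int) (s : Int) (k : Nat)
    (h : s % 33554393 = a * 252533 ^ k % 33554393) :
    s * 252533 % 33554393 = pvF a (k + 1) := by
  have hstep := pv_step a s k h
  rwa [PySem.Int.mod_eq_emod_of_pos (by norm_num : (0:Int) < 33554393)] at hstep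

lemma pvF_mod_self (a : Int) (k : Nat) : pvF a k % 33554393 = a * 252533 ^ k % 33554393 := by
  unfold pvF; exact Int.emod_emod_of_dvd _ dvd_rfl

-- the inner fold (one diagonal), started at a value s congruent to a·c^k
lemma pv_inner_fold (i : Nat) (a s : Int) (k : Nat) (acc : List Int)
    (h : s % 33554393 = a * 252533 ^ k % 33554393) :
    (List.range i).foldl
      (fun (st : List Int × Int) (_ : Nat) =>
        let lc := PySem.Int.mod (st.2 * 252533) 33554393
        (st.1 ++ [lc], lc)) (acc, s)
    = (acc ++ (List.range i).map (fun j => pvF a (k + 1 + j)),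
       if i = 0 then s else pvF a (k + i)) := by
  induction i with
  | zero => simp
  | succ i ih =>
    rw [List.range_succ, List.foldl_append, ih]
    by_cases hi : i = 0
    · subst hi
      simp [pv_step' a s k h]
    · simp only [hi, if_false, List.foldl_cons, List.foldl_nil, Nat.succ_ne_zero]
      have hstep : PySem.Int.mod (pvF a (k + i) * 252533) 33554393 = pvF a (k + i + 1) :=
        pv_step a (pvF a (k + i)) (k + i) (pvF_mod_self a (k + i))
      simp only [hstep, List.map_append, List.map_cons, List.map_nil,
        List.append_assoc]
      simp only [show k + 1 + i = k + i + 1 from by omega, show k + (i + 1) = k + i + 1 from by omega]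

-- pvSimOneDiag on a cast Nat count
lemma pvSimOneDiag_eq (i : Nat) (a s : Int) (k : Nat)
    (h : s % 33554393 = a * 252533 ^ k % 33554393) :
    pvSimOneDiag (i : Int) s = (List.range i).map (fun j => pvF a (k + 1 + j)) := by
  unfold pvSimOneDiag
  rw [PySem.List.pyRange_zero_nat, List.foldl_map, pv_inner_fold i a s k [] h]
  simp

-- last element of a mapped range via pyGetD (-1)
lemma pv_last_of_map_range (g : Nat → Int) (i : Nat) (hi : 1 ≤ i) :
    PySem.List.pyGetD ((List.range i).map g) (-1) 0 = g (i - 1) := by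
  obtain ⟨i', rfl⟩ : ∃ i', i = i' + 1 := ⟨i - 1, by omega⟩
  rw [List.range_succ, List.map_append, List.map_cons, List.map_nil,
    PySem.List.pyGetD_neg_one_append_singleton]
  simp

-- the outer fold over diagonals 2..D
lemma pv_outer_fold (D : Nat) (hD : 2 ≤ D) (a : Int) :
    (PySem.List.pyRange 2 ((D : Int) + 1) 1).foldl
      (fun (st : List Int × Int) i =>
        let diag := pvSimOneDiag i st.2
        (diag, PySem.List.pyGetD diag (-1) 0))
      (([] : List Int), a)
    = ((List.range D).map (fun j => pvF a (pvS (D - 1) + j)), pvF a (pvS D - 1)) := by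
  induction D, hD using Nat.le_induction with
  | base =>
    have hr : PySem.List.pyRange 2 (((2 : Nat) : Int) + 1) 1 = [(2 : Int)] := by decide
    rw [hr]
    simp only [List.foldl_cons, List.foldl_nil]
    have hdiag := pvSimOneDiag_eq 2 a a 0 (by simp)
    rw [show (((2 : Nat)) : Int) = (2 : Int) from by norm_num] at hdiag
    rw [hdiag, pv_last_of_map_range _ 2 (by norm_num)]
    simp [pvS]
  | succ D hD ih =>
    have hcast : ((D + 1 : Nat) : Int) + 1 = ((D : Int) + 1) + 1 := by push_cast; ring
    rw [hcast, PySem.List.pyRange_one_succ_right (by exact_mod_cast by omega : (2:Int) ≤ (D:Int) + 1),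
      List.foldl_append, ih]
    simp only [List.foldl_cons, List.foldl_nil]
    have hdiag : pvSimOneDiag ((D : Int) + 1) (pvF a (pvS D - 1))
        = (List.range (D + 1)).map (fun j => pvF a ((pvS D - 1) + 1 + j)) := by
      rw [show ((D:Int) + 1) = ((D + 1 : Nat) : Int) from by push_cast; ring]
      exact pvSimOneDiag_eq (D + 1) a _ (pvS D - 1) (pvF_mod_self a _)
    rw [hdiag, pv_last_of_map_range _ (D + 1) (by omega)]
    have hS : 1 ≤ pvS D := by
      have := pvS_eq D; nlinarith
    rw [show pvS D - 1 + 1 = pvS D from by omega]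
    simp only [Nat.add_sub_cancel]
    rw [show pvS D + D = pvS (D + 1) - 1 from by simp only [pvS]; omega]

-- ===== VERDICT (by name: the statement is the Claim_ definition above) =====
theorem solve_spec : Claim_equal_solve := by
  intro a row col _hdom hpre
  obtain ⟨hrow, hcol⟩ := hpre
  unfold Spec_solve solve solve_alt
  by_cases hbase : row = col ∧ col = 1
  · simp [hbase]
  · simp only [hbase, if_false]
    -- D ≥ 2
    have hD2 : 2 ≤ row + col - 1 := by
      rcases eq_or_lt_of_le hrow with h1 | h1
      · rcases eq_or_lt_of_le hcol with h2 | h2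
        · exact absurd ⟨by omega, h2.symm⟩ hbase
        · omega
      · omega
    set D : Nat := (row + col - 1).toNat with hDdef
    have hDcast : (D : Int) = row + col - 1 := by omega
    have hDge : 2 ≤ D := by omega
    rw [show row + col - 1 = (D : Int) by omega]
    rw [pv_outer_fold D hDge a]
    -- index the diagonal
    have hlt : (col - 1).toNat < D := by omega
    rw [PySem.List.pyGetD_eq_getElem _ _ (by omega) (by simp; omega)]
    rw [List.getElem_map, List.getElem_range]
    -- the exponent matches B's closed form
    have hfloor : PySem.Int.floordiv ((D:Int) * ((D:Int) - 1)) 2 = (pvS (D - 1) : Int) := by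
      rw [PySem.Int.floordiv_eq_ediv_of_pos (by norm_num)]
      have h2S : 2 * (pvS (D - 1) : Int) = (D : Int) * ((D : Int) - 1) := by
        have h := pvS_eq (D - 1)
        have hD1 : D - 1 + 1 = D := by omega
        rw [hD1] at h
        have hc : ((2 * pvS (D - 1) : Nat) : Int) = (((D - 1) * D : Nat) : Int) := by
          exact_mod_cast congrArg (fun n : Nat => (n : Int)) h
        push_cast at hc
        rw [show ((D - 1 : Nat) : Int) = (D : Int) - 1 from by omega] at hc
        linarith
      rw [← h2S]
      omega
    rw [hfloor]
    have hn : (pvS (D - 1) : Int) + col - 1 = ((pvS (D - 1) + (col - 1).toNat : Nat) : Int) := by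
      push_cast; omega
    rw [hn]
    unfold pvPow
    rw [if_neg (by push_cast; omega), Int.toNat_natCast, pvPowMod_correct]
    unfold pvF
    rw [PySem.Int.mod_eq_emod_of_pos (by norm_num : (0:Int) < 33554393)]
    conv_rhs => rw [Int.mul_emod, Int.emod_emod_of_dvd _ dvd_rfl, ← Int.mul_emod]
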